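-- pv_equiv track=rewrite | github.com/SaiPranay04/Flames | app.py | remove_common_chars
-- ===== SOURCE A (Python) =====
-- def remove_common_chars(name1, name2):
--     name1_list = list(name1)
--     name2_list = list(name2)
--
--     for char in name1_list[:]:
--         if char in name2_list:
--             name1_list.remove(char)
--             name2_list.remove(char)
--
--     return len(name1_list) + len(name2_list)
-- ===== SOURCE B (Python) =====
-- def remove_common_chars(name1, name2):
--     counts = {}
--     for c in name2:
--         counts[c] = counts.get(c, 0) + 1
--     total = len(name1) + len(name2)
--     for c in name1:
--         if counts.get(c, 0) > 0:
--             counts[c] = counts[c] - 1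
--             total -= 2
--     return total
-- ===== Notes on version B (the rewrite author's own statement) =====
-- stated objective: faster
-- what changed: Replaces A's repeated linear membership test and list.remove scans with a character-count dictionary of name2 built once, then a single pass over name1 decrementing counts and subtracting 2 per match.
import Mathlib
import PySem

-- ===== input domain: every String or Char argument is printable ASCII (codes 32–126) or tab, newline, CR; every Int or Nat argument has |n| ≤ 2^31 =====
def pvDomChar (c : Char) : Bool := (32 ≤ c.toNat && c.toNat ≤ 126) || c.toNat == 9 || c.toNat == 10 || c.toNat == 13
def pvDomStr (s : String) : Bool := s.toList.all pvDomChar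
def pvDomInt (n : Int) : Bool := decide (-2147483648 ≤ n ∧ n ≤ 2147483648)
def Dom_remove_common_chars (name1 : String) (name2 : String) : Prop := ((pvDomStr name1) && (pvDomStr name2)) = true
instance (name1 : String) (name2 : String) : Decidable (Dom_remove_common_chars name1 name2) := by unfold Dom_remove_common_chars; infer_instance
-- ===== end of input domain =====

-- B builds a character-count dict of name2 once and does a single pass over name1 (O(n) vs A's O(n^2)).

-- ===== PORT A =====
-- the loop 'for char in name1_list[:]: if char in name2_list: both.remove(char)':
-- state is (l1, l2); the 'remove' calls are guarded by membership, so remove? is always some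
-- and the '.getD' default is unreachable.
def pvLoopA : List Char → List Char → List Char → List Char × List Char
  | [], l1, l2 => (l1, l2)
  | c :: rest, l1, l2 =>
    if l2.contains c then
      pvLoopA rest ((PySem.List.remove? l1 c).getD l1) ((PySem.List.remove? l2 c).getD l2)
    else
      pvLoopA rest l1 l2

def remove_common_chars (name1 : String) (name2 : String) : Int :=
  let p := pvLoopA name1.toList name1.toList name2.toList
  (p.1.length : Int) + (p.2.length : Int)

-- ===== PORT B =====
-- counts = {}; for c in name2: counts[c] = counts.get(c, 0) + 1
def pvBuild (l : List Char) : PySem.Dict Char Int :=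
  l.foldl (fun d c => d.insert c (d.getD c 0 + 1)) PySem.Dict.empty

-- for c in name1: if counts.get(c, 0) > 0: counts[c] -= 1; total -= 2
def pvLoopB : List Char → PySem.Dict Char Int → Int → Int
  | [], _, total => total
  | c :: rest, counts, total =>
    if counts.getD c 0 > 0 then
      pvLoopB rest (counts.insert c (counts.getD c 0 - 1)) (total - 2)
    else
      pvLoopB rest counts total

def remove_common_chars_alt (name1 : String) (name2 : String) : Int :=
  pvLoopB name1.toList (pvBuild name2.toList)
    ((name1.toList.length : Int) + (name2.toList.length : Int))

-- ===== PRECONDITION & SPEC =====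
def Spec_remove_common_chars (name1 : String) (name2 : String) (out : Int) : Prop := out = remove_common_chars_alt name1 name2
instance (name1 : String) (name2 : String) (out : Int) : Decidable (Spec_remove_common_chars name1 name2 out) := by unfold Spec_remove_common_chars; infer_instance

-- ===== CLAIM (what is proved, stated in full; the proofs are below) =====
def Claim_equal_remove_common_chars : Prop := ∀ (name1 : String) (name2 : String), Dom_remove_common_chars name1 name2 → Spec_remove_common_chars name1 name2 (remove_common_chars name1 name2)

-- ===== LEMMAS AND PROOFS =====

-- the built dict is a counter of l
theorem pvBuild_step (l : List Char) (d : PySem.Dict Char Int) (c : Char) :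
    (l.foldl (fun d c => d.insert c (d.getD c 0 + 1)) d).getD c 0
      = d.getD c 0 + (l.count c : Int) := by
  induction l generalizing d with
  | nil => simp
  | cons x rest ih =>
    simp only [List.foldl_cons, ih, PySem.Dict.getD_insert, List.count_cons]
    by_cases h : c = x
    · subst h; simp; ring
    · simp [h, Ne.symm h]

theorem pvBuild_getD (l : List Char) (c : Char) :
    (pvBuild l).getD c 0 = (l.count c : Int) := by
  simpa using pvBuild_step l PySem.Dict.empty c

-- main invariant: A's remaining (l1, l2) lists vs B's (counts, total) state
theorem pvLoop_key (xs : List Char) :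
    ∀ (l1 l2 : List Char) (counts : PySem.Dict Char Int) (total : Int),
      (∀ c, xs.count c ≤ l1.count c) →
      (∀ c, counts.getD c 0 = (l2.count c : Int)) →
      total = (l1.length : Int) + (l2.length : Int) →
      ((pvLoopA xs l1 l2).1.length : Int) + ((pvLoopA xs l1 l2).2.length : Int)
        = pvLoopB xs counts total := by
  induction xs with
  | nil => intro l1 l2 counts total _ _ ht; simpa [pvLoopA, pvLoopB] using ht.symm
  | cons c rest ih =>
    intro l1 l2 counts total h1 h2 ht
    have hc1 : c ∈ l1 := by
      have := h1 c
      simp only [List.count_cons_self] at this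
      exact List.count_pos_iff.mp (by omega)
    by_cases hmem : c ∈ l2
    · have hcont : l2.contains c = true := by simpa using hmem
      have hpos : counts.getD c 0 > 0 := by
        rw [h2 c]; exact_mod_cast List.count_pos_iff.mpr hmem
      have r1 : PySem.List.remove? l1 c = some (l1.erase c) :=
        PySem.List.remove?_eq_some_erase l1 c hc1
      have r2 : PySem.List.remove? l2 c = some (l2.erase c) :=
        PySem.List.remove?_eq_some_erase l2 c hmem
      simp only [pvLoopA, pvLoopB, hcont, if_pos hpos, r1, r2, Option.getD_some]
      apply ih
      · intro d
        rw [List.count_erase]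
        have := h1 d
        have := List.count_pos_iff.mpr hc1
        by_cases hdc : d = c
        · subst hdc; simp at *; omega
        · simp [hdc, Ne.symm hdc] at *; omega
      · intro d
        rw [PySem.Dict.getD_insert, List.count_erase]
        have hc2 := List.count_pos_iff.mpr hmem
        by_cases hdc : d = c
        · subst hdc
          simp only [h2 d, beq_self_eq_true, if_pos]
          omega
        · simp [hdc, Ne.symm hdc, h2 d]
      · have e1 := List.length_erase_of_mem hc1
        have e2 := List.length_erase_of_mem hmem
        have hl1 : 0 < l1.length := List.length_pos_of_mem hc1
        have hl2 : 0 < l2.length := List.length_pos_of_mem hmem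
        omega
    · have hcont : l2.contains c = false := by simpa using hmem
      have hpos : ¬ counts.getD c 0 > 0 := by
        rw [h2 c]
        have : l2.count c = 0 := by simpa [List.count_eq_zero] using hmem
        simp [this]
      simp only [pvLoopA, pvLoopB, hcont, Bool.false_eq_true, if_false, if_neg hpos]
      apply ih _ _ _ _ _ h2 ht
      intro d
      have := h1 d
      simp only [List.count_cons] at this
      omega

-- ===== VERDICT (by name: the statement is the Claim_ definition above) =====
theorem remove_common_chars_spec : Claim_equal_remove_common_chars := by
  intro name1 name2 _
  unfold Spec_remove_common_chars remove_common_chars remove_common_chars_alt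
  exact pvLoop_key name1.toList name1.toList name2.toList _ _
    (fun c => le_refl _) (fun c => pvBuild_getD _ c) rfl
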